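-- pv_equiv track=rewrite | github.com/achrafness/Project-0 | Sherlock Holmes  (Problem Solving)/1-NoP4$$/main.py | is_valid_phrase
-- ===== SOURCE A (Python) =====
-- def is_valid_phrase(phrase):
--     words = phrase.split()
--     word_count = {}
--     for word in words:
--         if word in word_count:
--             return False
--         else:
--             word_count[word] = 1
--     return True
-- ===== SOURCE B (Python) =====
-- def is_valid_phrase(phrase):
--     ws = sorted(phrase.split())
--     return all(a != b for a, b in zip(ws, ws[1:]))
-- ===== Notes on version B (the rewrite author's own statement) =====
-- stated objective: alternative
-- what changed: Replaces the hash-dict one-pass duplicate scan with a sort-then-adjacent-compare: sort the words so equal words become neighbours, then check every adjacent pair differs; no dict, membership test or early return remains.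
import Mathlib
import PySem

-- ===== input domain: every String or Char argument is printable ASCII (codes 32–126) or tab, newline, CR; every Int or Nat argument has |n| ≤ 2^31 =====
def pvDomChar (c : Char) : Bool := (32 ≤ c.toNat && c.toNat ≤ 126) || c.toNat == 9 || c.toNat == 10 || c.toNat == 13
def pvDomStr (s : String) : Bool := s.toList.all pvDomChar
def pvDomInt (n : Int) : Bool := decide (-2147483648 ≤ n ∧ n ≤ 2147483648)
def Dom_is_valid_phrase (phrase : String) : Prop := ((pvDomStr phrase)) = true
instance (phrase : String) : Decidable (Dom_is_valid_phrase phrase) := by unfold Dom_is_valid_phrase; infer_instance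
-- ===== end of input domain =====

-- B replaces A's dict-based one-pass duplicate scan by sort-then-adjacent-compare (alternative algorithm).
-- ===== PORT A =====
def isvpLoop : List String → PySem.Dict String Int → Bool
  | [], _ => true
  | w :: ws, d => if d.contains w then false else isvpLoop ws (d.insert w 1)

def is_valid_phrase (phrase : String) : Bool :=
  isvpLoop (PySem.Str.split₀ phrase) PySem.Dict.empty

-- ===== PORT B =====
def is_valid_phrase_alt (phrase : String) : Bool :=
  let ws := PySem.List.sorted (PySem.Str.split₀ phrase) (fun x => x) false
  (ws.zip (PySem.List.slice ws (some 1) none)).all (fun p => p.1 != p.2)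

-- ===== PRECONDITION & SPEC =====
def Spec_is_valid_phrase (phrase : String) (out : Bool) : Prop := out = is_valid_phrase_alt phrase
instance (phrase : String) (out : Bool) : Decidable (Spec_is_valid_phrase phrase out) := by unfold Spec_is_valid_phrase; infer_instance

-- ===== CLAIM (what is proved, stated in full; the proofs are below) =====
def Claim_equal_is_valid_phrase : Prop := ∀ (phrase : String), Dom_is_valid_phrase phrase → Spec_is_valid_phrase phrase (is_valid_phrase phrase)

-- ===== LEMMAS AND PROOFS =====

-- A's loop returns true iff the remaining words are distinct and none is already a key.
lemma isvpLoop_iff (ws : List String) (d : PySem.Dict String Int) :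
    isvpLoop ws d = true ↔ ws.Nodup ∧ ∀ x ∈ ws, x ∉ d.keys := by
  induction ws generalizing d with
  | nil => simp [isvpLoop]
  | cons w ws ih =>
    by_cases hc : d.contains w = true
    · have hmem : w ∈ d.keys := (PySem.Dict.contains_iff_mem_keys d w).1 hc
      simp only [isvpLoop, hc, if_true]
      constructor
      · intro h; exact absurd h (by simp)
      · rintro ⟨-, h⟩; exact absurd hmem (h w (by simp))
    · have hc' : d.contains w = false := by simpa using hc
      have hnm : w ∉ d.keys := fun h => by
        simp [(PySem.Dict.contains_iff_mem_keys d w).2 h] at hc'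
      have hkeys : (d.insert w 1).keys = d.keys ++ [w] :=
        PySem.Dict.keys_insert_of_not_contains d 1 hc'
      simp only [isvpLoop, hc', if_false, Bool.false_eq_true, ih, hkeys, List.nodup_cons,
        List.mem_cons, List.mem_append]
      constructor
      · rintro ⟨hn, h⟩
        refine ⟨⟨fun hws => h w hws (Or.inr (Or.inl rfl)), hn⟩, ?_⟩
        rintro x (rfl | hx)
        · exact fun hk => hnm hk
        · exact fun hk => h x hx (Or.inl hk)
      · rintro ⟨⟨hnw, hn⟩, h⟩
        refine ⟨hn, fun x hx => ?_⟩
        rintro (hk | rfl | h0)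
        · exact h x (Or.inr hx) hk
        · exact hnw hx
        · exact absurd h0 (by simp)

-- On a ≤-sorted list, all adjacent pairs differ iff the list has no duplicates.
lemma zip_tail_ne_iff_nodup (l : List String) (hp : l.Pairwise (· ≤ ·)) :
    ((l.zip l.tail).all (fun p => p.1 != p.2)) = true ↔ l.Nodup := by
  induction l with
  | nil => simp
  | cons a t ih =>
    cases t with
    | nil => simp
    | cons b u =>
      have hp' : (b :: u).Pairwise (· ≤ ·) := hp.tail
      have hab : a ≤ b := (List.pairwise_cons.1 hp).1 b (by simp)
      have hbu : ∀ x ∈ u, b ≤ x := (List.pairwise_cons.1 hp').1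
      have ihh := ih hp'
      simp only [List.tail_cons, List.zip_cons_cons, List.all_cons, Bool.and_eq_true,
        bne_iff_ne, ne_eq] at ihh ⊢
      constructor
      · rintro ⟨hne, hrest⟩
        have hnd : (b :: u).Nodup := ihh.1 hrest
        refine List.nodup_cons.2 ⟨?_, hnd⟩
        have halt : a < b := lt_of_le_of_ne hab hne
        intro hmem
        rcases List.mem_cons.1 hmem with rfl | hmu
        · exact hne rfl
        · exact absurd (lt_of_lt_of_le halt (hbu a hmu)) (lt_irrefl a)
      · intro hnd
        rcases List.nodup_cons.1 hnd with ⟨hna, hnd'⟩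
        exact ⟨fun he => hna (he ▸ List.mem_cons_self), ihh.2 hnd'⟩

-- ===== VERDICT (by name: the statement is the Claim_ definition above) =====
theorem is_valid_phrase_spec : Claim_equal_is_valid_phrase := by
  intro phrase _
  unfold Spec_is_valid_phrase is_valid_phrase is_valid_phrase_alt
  set words := PySem.Str.split₀ phrase with hw
  set srt := PySem.List.sorted words (fun x => x) false with hs
  have hperm : srt.Perm words := PySem.List.sorted_perm words (fun x => x) false
  have hpair : srt.Pairwise (· ≤ ·) := by
    have := PySem.List.sorted_pairwise words (fun x => x)
    simpa [hs] using this
  simp only [PySem.List.slice_from_one]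
  rw [Bool.eq_iff_iff, isvpLoop_iff, zip_tail_ne_iff_nodup srt hpair]
  simp only [PySem.Dict.keys_empty, List.not_mem_nil, not_false_iff, imp_true_iff, and_true]
  exact (hperm.nodup_iff).symm
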